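-- pv_equiv track=rewrite | github.com/wizardgang/audiobook-stack | abogen_src/abogen/webui/debug_tts_runner.py | _spoken_id
-- ===== SOURCE A (Python) =====
-- from typing import Any, Dict, List, Mapping, Optional, Sequence, Tuple
--
-- def _spoken_id(code: str) -> str:
--     # Make IDs pronounceable and stable (avoid reading as a word).
--     out: List[str] = []
--     for ch in str(code or ""):
--         if ch == "_":
--             out.append(" ")
--         elif ch.isalnum():
--             out.append(ch)
--         else:
--             out.append(" ")
--     # Add spaces between alnum to encourage letter-by-letter reading.
--     spaced = " ".join("".join(out).split())
--     return spaced
-- ===== SOURCE B (Python) =====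
-- def _spoken_id(code: str) -> str:
--     # One pass: collect maximal alnum runs as words, then join with single spaces.
--     words = []
--     buf = []
--     for ch in str(code or ""):
--         if ch.isalnum():
--             buf.append(ch)
--         else:
--             if buf:
--                 words.append("".join(buf))
--                 buf = []
--     if buf:
--         words.append("".join(buf))
--     return " ".join(words)
-- ===== Notes on version B (the rewrite author's own statement) =====
-- stated objective: alternative
-- what changed: Single pass that accumulates maximal alnum runs directly into a word list and joins once, instead of building a substituted character list, joining it into a spaced string, splitting on whitespace and joining again.
import Mathlib
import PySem

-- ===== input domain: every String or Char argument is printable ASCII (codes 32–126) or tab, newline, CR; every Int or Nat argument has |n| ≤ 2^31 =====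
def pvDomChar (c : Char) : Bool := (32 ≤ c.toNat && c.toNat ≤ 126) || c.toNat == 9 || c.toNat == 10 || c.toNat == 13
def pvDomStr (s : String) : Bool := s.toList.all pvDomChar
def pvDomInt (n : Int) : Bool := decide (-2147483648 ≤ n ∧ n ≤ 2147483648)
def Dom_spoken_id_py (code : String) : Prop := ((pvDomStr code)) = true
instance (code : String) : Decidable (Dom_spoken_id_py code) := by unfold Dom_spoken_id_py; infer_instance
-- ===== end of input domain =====

-- B replaces A's substitute-join-split-join pipeline by one pass that collects maximal
-- alnum runs as words and joins once (alternative decomposition, same asymptotic cost).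

-- ===== PORT A =====
def spoken_id_py (code : String) : String :=
  -- out: list of one-char strings, '_' and non-alnum replaced by " "
  let out : List String := code.toList.foldl
    (fun acc ch =>
      if ch == '_' then acc ++ [" "]
      else if PySem.Chars.isalnum ch then acc ++ [String.ofList [ch]]
      else acc ++ [" "]) []
  -- spaced = " ".join("".join(out).split())
  PySem.Str.join " " (PySem.Str.split₀ (PySem.Str.join "" out))

-- ===== PORT B =====
-- the for-loop of Source B, with its buffer `buf` and word list `ws`
def spokenAltGo : List Char → List Char → List (List Char) → List (List Char)
  | [], buf, ws => if buf.isEmpty then ws else ws ++ [buf]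
  | c :: cs, buf, ws =>
    if PySem.Chars.isalnum c then spokenAltGo cs (buf ++ [c]) ws
    else spokenAltGo cs [] (if buf.isEmpty then ws else ws ++ [buf])

def spoken_id_py_alt (code : String) : String :=
  String.ofList (PySem.Chars.join [' '] (spokenAltGo code.toList [] []))

-- ===== PRECONDITION & SPEC =====
def Spec_spoken_id_py (code : String) (out : String) : Prop := out = spoken_id_py_alt code
instance (code : String) (out : String) : Decidable (Spec_spoken_id_py code out) := by unfold Spec_spoken_id_py; infer_instance

-- ===== CLAIM (what is proved, stated in full; the proofs are below) =====
def Claim_equal_spoken_id_py : Prop := ∀ (code : String), Dom_spoken_id_py code → Spec_spoken_id_py code (spoken_id_py code)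

-- ===== LEMMAS AND PROOFS =====

-- the character substitution A performs
def spokenSub (ch : Char) : Char :=
  if ch == '_' then ' ' else if PySem.Chars.isalnum ch then ch else ' '

theorem isspace_false_of_isalnum (c : Char) (h : PySem.Chars.isalnum c = true) :
    PySem.Chars.isspace c = false := by
  have h1 : 'A'.val.toNat = 65 := rfl
  have h2 : 'Z'.val.toNat = 90 := rfl
  have h3 : 'a'.val.toNat = 97 := rfl
  have h4 : 'z'.val.toNat = 122 := rfl
  have h5 : '0'.val.toNat = 48 := rfl
  have h6 : '9'.val.toNat = 57 := rfl
  simp only [PySem.Chars.isalnum, PySem.Chars.isalpha, PySem.Chars.isdigit, PySem.Chars.isspace,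
    PySem.Chars.isupper, PySem.Chars.islower, Bool.or_eq_true, Bool.and_eq_true, decide_eq_true_eq,
    Char.le_def, UInt32.le_iff_toNat_le, Bool.or_eq_false_iff, Bool.and_eq_false_iff,
    decide_eq_false_iff_not, not_le, Char.toNat, h1, h2, h3, h4, h5, h6] at *
  omega

theorem split₀_go_map_sub (cs : List Char) :
    ∀ (buf : List Char) (acc : List (List Char)),
      PySem.Chars.split₀.go (cs.map spokenSub) buf.reverse acc = spokenAltGo cs buf acc.reverse := by
  induction cs with
  | nil =>
    intro buf acc
    rcases buf with _ | ⟨b, bs⟩ <;> simp [PySem.Chars.split₀.go, spokenAltGo]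
  | cons c cs ih =>
    intro buf acc
    by_cases hc : PySem.Chars.isalnum c = true
    · have hne : (c == '_') = false := by
        by_contra h
        simp at h
        subst h
        simp [PySem.Chars.isalnum, PySem.Chars.isalpha, PySem.Chars.isdigit,
          PySem.Chars.isupper, PySem.Chars.islower] at hc
      have hs := isspace_false_of_isalnum c hc
      simp only [List.map_cons, spokenSub, hne, if_false, hc, if_true,
        PySem.Chars.split₀.go, hs, Bool.false_eq_true, if_false, spokenAltGo]
      have hrev : c :: buf.reverse = (buf ++ [c]).reverse := by simp
      rw [hrev, ih (buf ++ [c]) acc]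
    · have hc' : PySem.Chars.isalnum c = false := by simpa using hc
      have hsub : spokenSub c = ' ' := by
        unfold spokenSub; by_cases h : (c == '_') = true <;> simp [h, hc']
      have hsp : PySem.Chars.isspace ' ' = true := by decide
      simp only [List.map_cons, hsub, PySem.Chars.split₀.go, hsp, if_true, spokenAltGo, hc',
        Bool.false_eq_true, if_false]
      rcases buf with _ | ⟨b, bs⟩
      · simpa using ih [] acc
      · have : ((b :: bs).reverse).isEmpty = false := by simp
        simp only [this, Bool.false_eq_true, if_false, List.isEmpty_cons, List.reverse_reverse]
        have := ih [] ((b :: bs) :: acc)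
        simpa using this

theorem split₀_map_sub (cs : List Char) :
    PySem.Chars.split₀ (cs.map spokenSub) = spokenAltGo cs [] [] := by
  have := split₀_go_map_sub cs [] []
  simpa [PySem.Chars.split₀] using this

-- ===== VERDICT (by name: the statement is the Claim_ definition above) =====
theorem spoken_id_py_spec : Claim_equal_spoken_id_py := by
  intro code _
  unfold Spec_spoken_id_py spoken_id_py spoken_id_py_alt
  have hfun : (fun (acc : List String) (ch : Char) =>
      if ch == '_' then acc ++ [" "]
      else if PySem.Chars.isalnum ch then acc ++ [String.ofList [ch]]
      else acc ++ [" "]) =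
      fun acc ch => acc ++ [String.ofList [spokenSub ch]] := by
    funext acc ch
    unfold spokenSub
    split_ifs <;> rfl
  rw [hfun, PySem.List.foldl_append_singleton_eq_map]
  simp only [List.nil_append, PySem.Str.join, PySem.Str.split₀, String.toList_ofList,
    List.map_map]
  have hsing : (String.ofList ∘ fun ch => [spokenSub ch]) = fun ch => String.ofList [spokenSub ch] := rfl
  have hmaps : code.toList.map (String.toList ∘ fun ch => String.ofList [spokenSub ch]) =
      (code.toList.map spokenSub).map (fun c => [c]) := by
    simp [Function.comp]
  rw [show ("" : String).toList = [] from rfl]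
  rw [hmaps, PySem.Chars.join_nil_singletons, split₀_map_sub]
  rw [show (" " : String).toList = [' '] from rfl]
  simp only [Function.comp_def, String.toList_ofList, List.map_id']
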